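-- pv_equiv track=rewrite | github.com/pypi-data/pypi-mirror-401 | packages/kapipe/kapipe-0.1.2.tar.gz/kapipe-0.1.2/kapipe/utils.py | create_seen_unseen_map
-- ===== SOURCE A (Python) =====
-- def create_seen_unseen_map(
--     document,
--     seen_pairs: set[tuple[str, str]]
-- ) -> dict[str, str]:
--     seen_unseen_map = {}
--     entities = document["entities"]
--     for u_entity_i in range(len(entities)):
--         u_entity = entities[u_entity_i]
--         u_entity_id = u_entity["entity_id"]
--         for v_entity_i in range(u_entity_i, len(entities)):
--             v_entity = entities[v_entity_i]
--             v_entity_id = v_entity["entity_id"]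
--             if (
--                 ((u_entity_id, v_entity_id) in seen_pairs)
--                 or
--                 ((v_entity_id, u_entity_id) in seen_pairs)
--             ):
--                 seen_unseen_map[f"{u_entity_id}-{v_entity_id}"] = "seen"
--                 seen_unseen_map[f"{v_entity_id}-{u_entity_id}"] = "seen"
--             else:
--                 seen_unseen_map[f"{u_entity_id}-{v_entity_id}"] = "unseen"
--                 seen_unseen_map[f"{v_entity_id}-{u_entity_id}"] = "unseen"
--     return seen_unseen_map
-- ===== SOURCE B (Python) =====
-- def create_seen_unseen_map(document, seen_pairs):
--     # Symmetrise the seen set once (sorted-tuple normal form), then recurse on the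
--     # id-list suffixes emitting the write sequence, and build the dict in one shot.
--     sym = {((a, b) if a <= b else (b, a)) for (a, b) in seen_pairs}
--
--     def label(a, b):
--         return "seen" if ((a, b) if a <= b else (b, a)) in sym else "unseen"
--
--     def writes(ids):
--         if not ids:
--             return []
--         u, rest = ids[0], ids[1:]
--         head = [(f"{u}-{u}", label(u, u))]
--         for v in rest:
--             head.append((f"{u}-{v}", label(u, v)))
--             head.append((f"{v}-{u}", label(v, u)))
--         return head + writes(rest)
--
--     return dict(writes([e["entity_id"] for e in document["entities"]]))
-- ===== Notes on version B (the rewrite author's own statement) =====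
-- stated objective: alternative
-- what changed: B symmetrises seen_pairs once into a sorted-tuple normal-form set so each pair needs one membership test instead of A's two-orientation test, generates the key/label write sequence by recursion on the suffixes of the id list (diagonal entry then the two mirror entries per later id), and builds the dict in a single dict(...) call, replacing A's index-based triangular double loop that does four conditional mirror writes into a growing dict.
import Mathlib
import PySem

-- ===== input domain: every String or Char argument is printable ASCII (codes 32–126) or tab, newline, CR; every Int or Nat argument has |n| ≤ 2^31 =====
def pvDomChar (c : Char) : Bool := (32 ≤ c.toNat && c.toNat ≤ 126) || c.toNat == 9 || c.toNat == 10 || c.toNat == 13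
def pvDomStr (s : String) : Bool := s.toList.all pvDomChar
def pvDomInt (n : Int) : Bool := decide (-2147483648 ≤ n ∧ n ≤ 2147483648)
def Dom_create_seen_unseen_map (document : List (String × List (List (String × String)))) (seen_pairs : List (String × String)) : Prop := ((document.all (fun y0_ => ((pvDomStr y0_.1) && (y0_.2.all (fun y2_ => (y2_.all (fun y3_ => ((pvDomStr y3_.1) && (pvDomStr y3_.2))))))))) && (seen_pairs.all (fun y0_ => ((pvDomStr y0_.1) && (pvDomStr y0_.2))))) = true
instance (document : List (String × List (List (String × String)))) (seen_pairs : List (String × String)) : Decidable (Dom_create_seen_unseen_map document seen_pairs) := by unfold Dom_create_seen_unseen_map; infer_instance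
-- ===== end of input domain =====

-- B symmetrises seen_pairs once into a sorted-tuple normal-form set (one lookup per pair instead of
-- A's two-orientation test), emits the write sequence by recursion on id-list suffixes, and builds
-- the dict in a single dict(...) call — replacing A's index-triangular loop with four mirror writes.
-- Return-value equivalence only; neither version mutates its arguments.

-- ===== PORT A =====
def create_seen_unseen_map (document : List (String × List (List (String × String)))) (seen_pairs : List (String × String)) : List (String × String) :=
  let entities := (PySem.Dict.mk document).getD "entities" []
  let d := (PySem.List.pyRange 0 (entities.length : Int) 1).foldl (fun m u_entity_i =>
      let u_entity := PySem.List.pyGetD entities u_entity_i []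
      let u_entity_id := (PySem.Dict.mk u_entity).getD "entity_id" ""
      (PySem.List.pyRange u_entity_i (entities.length : Int) 1).foldl (fun m v_entity_i =>
        let v_entity := PySem.List.pyGetD entities v_entity_i []
        let v_entity_id := (PySem.Dict.mk v_entity).getD "entity_id" ""
        if (u_entity_id, v_entity_id) ∈ seen_pairs ∨ (v_entity_id, u_entity_id) ∈ seen_pairs then
          (m.insert (u_entity_id ++ "-" ++ v_entity_id) "seen").insert (v_entity_id ++ "-" ++ u_entity_id) "seen"
        else
          (m.insert (u_entity_id ++ "-" ++ v_entity_id) "unseen").insert (v_entity_id ++ "-" ++ u_entity_id) "unseen") m)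
    PySem.Dict.empty
  d.items

-- ===== PORT B =====
-- sorted-tuple normal form of a pair: (a, b) if a <= b else (b, a)
def pvNorm (a b : String) : String × String := if a ≤ b then (a, b) else (b, a)

-- label(a, b): one membership test against the symmetrised set
def pvLabel (sym : PySem.Set (String × String)) (a b : String) : String :=
  if PySem.Set.contains sym (pvNorm a b) then "seen" else "unseen"

-- writes(ids): recursion on the suffixes of the id list
def pvWrites (sym : PySem.Set (String × String)) : List String → List (String × String)
  | [] => []
  | u :: rest =>
      (rest.foldl (fun h v =>
          (h ++ [(u ++ "-" ++ v, pvLabel sym u v)]) ++ [(v ++ "-" ++ u, pvLabel sym v u)])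
        [(u ++ "-" ++ u, pvLabel sym u u)]) ++ pvWrites sym rest

def create_seen_unseen_map_alt (document : List (String × List (List (String × String)))) (seen_pairs : List (String × String)) : List (String × String) :=
  let sym : PySem.Set (String × String) := PySem.Set.ofList (seen_pairs.map (fun p => pvNorm p.1 p.2))
  let ids := ((PySem.Dict.mk document).getD "entities" []).map (fun e => (PySem.Dict.mk e).getD "entity_id" "")
  (PySem.Dict.ofList (pvWrites sym ids)).items

-- ===== PRECONDITION & SPEC =====
-- Pre_ excludes exactly the inputs where Python A raises KeyError: a document without an
-- "entities" key, or an entity dict without an "entity_id" key.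
def Pre_create_seen_unseen_map (document : List (String × List (List (String × String)))) (seen_pairs : List (String × String)) : Prop :=
  (PySem.Dict.mk document).contains "entities" = true ∧
  ∀ e ∈ (PySem.Dict.mk document).getD "entities" [], (PySem.Dict.mk e).contains "entity_id" = true
instance (document : List (String × List (List (String × String)))) (seen_pairs : List (String × String)) : Decidable (Pre_create_seen_unseen_map document seen_pairs) := by unfold Pre_create_seen_unseen_map; infer_instance

def pvWitness_create_seen_unseen_map : (List (String × List (List (String × String)))) × (List (String × String)) :=
  ([("entities", [[("entity_id", "a")], [("entity_id", "b")]])], [("a", "b")])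

def Spec_create_seen_unseen_map (document : List (String × List (List (String × String)))) (seen_pairs : List (String × String)) (out : List (String × String)) : Prop := out = create_seen_unseen_map_alt document seen_pairs
instance (document : List (String × List (List (String × String)))) (seen_pairs : List (String × String)) (out : List (String × String)) : Decidable (Spec_create_seen_unseen_map document seen_pairs out) := by unfold Spec_create_seen_unseen_map; infer_instance

-- ===== CLAIM (what is proved, stated in full; the proofs are below) =====
def Claim_equal_create_seen_unseen_map : Prop := ∀ (document : List (String × List (List (String × String)))) (seen_pairs : List (String × String)), Dom_create_seen_unseen_map document seen_pairs → Pre_create_seen_unseen_map document seen_pairs → Spec_create_seen_unseen_map document seen_pairs (create_seen_unseen_map document seen_pairs)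

-- ===== LEMMAS AND PROOFS =====

-- the single-insert step both ports normalise to
def pvIns (seen_pairs : List (String × String)) (m : PySem.Dict String String) (ab : String × String) : PySem.Dict String String :=
  m.insert (ab.1 ++ "-" ++ ab.2)
    (if (ab.1, ab.2) ∈ seen_pairs ∨ (ab.2, ab.1) ∈ seen_pairs then "seen" else "unseen")

-- the ordered-pair sequence shared by both write orders
def pvPairs : List String → List (String × String)
  | [] => []
  | u :: rest => ((u, u) :: rest.flatMap (fun v => [(u, v), (v, u)])) ++ pvPairs rest

-- A's triangular loop, as structural recursion on the id list
def pvAGo (seen_pairs : List (String × String)) (m : PySem.Dict String String) : List String → PySem.Dict String String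
  | [] => m
  | u :: rest =>
      pvAGo seen_pairs
        ((u :: rest).foldl (fun m v =>
          if (u, v) ∈ seen_pairs ∨ (v, u) ∈ seen_pairs then
            (m.insert (u ++ "-" ++ v) "seen").insert (v ++ "-" ++ u) "seen"
          else
            (m.insert (u ++ "-" ++ v) "unseen").insert (v ++ "-" ++ u) "unseen") m) rest

theorem pvFoldl_flatMap {α β : Type} (g : α → List β) (f : PySem.Dict String String → β → PySem.Dict String String) :
    ∀ (l : List α) (m : PySem.Dict String String), (l.flatMap g).foldl f m = l.foldl (fun m x => (g x).foldl f m) m := by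
  intro l
  induction l with
  | nil => intro m; rfl
  | cons x t ih => intro m; simp [List.flatMap_cons, List.foldl_append, ih]

-- A's per-u step on v equals two pvIns steps on (u,v) then (v,u)
theorem pvStep_eq (sp : List (String × String)) (u v : String) (m : PySem.Dict String String) :
    (if (u, v) ∈ sp ∨ (v, u) ∈ sp then
      (m.insert (u ++ "-" ++ v) "seen").insert (v ++ "-" ++ u) "seen"
    else
      (m.insert (u ++ "-" ++ v) "unseen").insert (v ++ "-" ++ u) "unseen")
    = pvIns sp (pvIns sp m (u, v)) (v, u) := by
  by_cases h : (u, v) ∈ sp ∨ (v, u) ∈ sp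
  · have h' : (v, u) ∈ sp ∨ (u, v) ∈ sp := h.symm
    simp [pvIns, h, h']
  · have h' : ¬ ((v, u) ∈ sp ∨ (u, v) ∈ sp) := fun hc => h hc.symm
    simp [pvIns, h, h']

-- A's recursion equals folding pvIns over the pair sequence
theorem pvAGo_eq_pairs (sp : List (String × String)) :
    ∀ (l : List String) (m : PySem.Dict String String), pvAGo sp m l = (pvPairs l).foldl (pvIns sp) m := by
  intro l
  induction l with
  | nil => intro m; rfl
  | cons u rest ih =>
    intro m
    show pvAGo sp _ rest = _
    rw [ih, pvPairs, List.foldl_append]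
    congr 1
    have hdiag :
        (if (u, u) ∈ sp ∨ (u, u) ∈ sp then
          (m.insert (u ++ "-" ++ u) "seen").insert (u ++ "-" ++ u) "seen"
        else
          (m.insert (u ++ "-" ++ u) "unseen").insert (u ++ "-" ++ u) "unseen")
        = pvIns sp m (u, u) := by
      by_cases h : (u, u) ∈ sp <;> simp [pvIns, h, PySem.Dict.insert_insert_self]
    rw [List.foldl_cons, List.foldl_cons, hdiag, pvFoldl_flatMap]
    apply PySem.List.foldl_congr_mem
    intro acc v _
    simpa using pvStep_eq sp u v acc

theorem pvDrop_cons {α : Type} (xs : List α) (k : Nat) (h : k < xs.length) :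
    xs.drop k = xs[k] :: xs.drop (k + 1) := by
  simpa using (List.drop_eq_getElem_cons h)

-- bridge A's outer pyRange fold to pvAGo, over suffixes of ids
theorem pvA_bridge (sp : List (String × String)) (ids : List String) :
    ∀ (fuel k : Nat), k ≤ ids.length → ids.length - k = fuel →
    ∀ m : PySem.Dict String String,
      (PySem.List.pyRange (k : Int) (ids.length : Int) 1).foldl (fun m ui =>
        let uid := PySem.List.pyGetD ids ui ""
        (PySem.List.pyRange ui (ids.length : Int) 1).foldl (fun m vi =>
          let vid := PySem.List.pyGetD ids vi ""
          if (uid, vid) ∈ sp ∨ (vid, uid) ∈ sp then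
            (m.insert (uid ++ "-" ++ vid) "seen").insert (vid ++ "-" ++ uid) "seen"
          else
            (m.insert (uid ++ "-" ++ vid) "unseen").insert (vid ++ "-" ++ uid) "unseen") m) m
      = pvAGo sp m (ids.drop k) := by
  intro fuel
  induction fuel with
  | zero =>
    intro k hk hf m
    have hk' : k = ids.length := by omega
    subst hk'
    rw [PySem.List.pyRange_one_eq_nil (by omega), List.drop_length]
    rfl
  | succ n ih =>
    intro k hk hf m
    have hklt : k < ids.length := by omega
    have hdrop := pvDrop_cons ids k hklt
    have hget : PySem.List.pyGetD ids (k : Int) "" = ids[k] := by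
      rw [PySem.List.pyGetD_natCast]; simp [List.getD, hklt]
    rw [PySem.List.pyRange_one_cons (by exact_mod_cast hklt), List.foldl_cons, hdrop]
    have hcast : ((k : Int) + 1) = ((k + 1 : Nat) : Int) := by push_cast; ring
    show (PySem.List.pyRange ((k : Int) + 1) (ids.length : Int) 1).foldl _ _ = _
    rw [hcast, ih (k + 1) (by omega) (by omega)]
    show pvAGo sp _ (ids.drop (k + 1)) = _
    rw [pvAGo]
    congr 1
    have hinner := PySem.List.foldl_pyRange_pyGetD (xs := ids) (a := (k : Int)) (d := "")
      (f := fun m vid =>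
        if (ids[k], vid) ∈ sp ∨ (vid, ids[k]) ∈ sp then
          (m.insert (ids[k] ++ "-" ++ vid) "seen").insert (vid ++ "-" ++ ids[k]) "seen"
        else
          (m.insert (ids[k] ++ "-" ++ vid) "unseen").insert (vid ++ "-" ++ ids[k]) "unseen")
      (init := m) (by positivity)
    simp only [PySem.List.len_eq, Int.toNat_natCast] at hinner
    rw [hdrop] at hinner
    simp only [hget]
    exact hinner

-- dict(pairs) = the sequence of writes (PySem.Dict.ofList is empty.update pairs)
theorem pvUpdate_foldl {κ ν : Type} [BEq κ] (ps : List (κ × ν)) (d : PySem.Dict κ ν) :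
    d.update ps = ps.foldl (fun d kv => d.insert kv.1 kv.2) d := by
  induction ps generalizing d <;> simp_all [PySem.Dict.update]

-- B's label test equals A's two-orientation test
theorem pvLabel_eq (sp : List (String × String)) (a b : String) :
    pvLabel (PySem.Set.ofList (sp.map (fun p => pvNorm p.1 p.2))) a b
      = (if (a, b) ∈ sp ∨ (b, a) ∈ sp then "seen" else "unseen") := by
  have hmem : (pvNorm a b ∈ PySem.Set.ofList (sp.map (fun p => pvNorm p.1 p.2)))
      ↔ ((a, b) ∈ sp ∨ (b, a) ∈ sp) := by
    rw [PySem.Set.mem_ofList, List.mem_map]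
    constructor
    · rintro ⟨⟨x, y⟩, hp, hnorm⟩
      unfold pvNorm at hnorm
      split_ifs at hnorm <;> injection hnorm with h3 h4 <;> subst h3 <;> subst h4 <;>
        first | exact Or.inl hp | exact Or.inr hp
    · rintro (h | h)
      · exact ⟨(a, b), h, rfl⟩
      · refine ⟨(b, a), h, ?_⟩
        unfold pvNorm
        rcases le_total a b with hab | hba
        · by_cases hba' : b ≤ a
          · have : a = b := le_antisymm hab hba'
            simp [this]
          · simp [hab, hba']
        · by_cases hab' : a ≤ b
          · have : a = b := le_antisymm hab' hba
            simp [this]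
          · simp [hba, hab']
  by_cases h : (a, b) ∈ sp ∨ (b, a) ∈ sp
  · simp [pvLabel, List.contains_iff_mem, hmem.mpr h, h]
  · simp [pvLabel, List.contains_iff_mem, hmem, h]

-- B's write sequence is the pair sequence with key/label attached
theorem pvWrites_eq_map (sym : PySem.Set (String × String)) :
    ∀ l : List String, pvWrites sym l = (pvPairs l).map (fun ab => (ab.1 ++ "-" ++ ab.2, pvLabel sym ab.1 ab.2)) := by
  intro l
  induction l with
  | nil => rfl
  | cons u rest ih =>
    rw [pvWrites, pvPairs, List.map_append, ih]
    congr 1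
    rw [List.map_cons]
    have hfold : ∀ (t : List String) (acc : List (String × String)),
        t.foldl (fun h v =>
            (h ++ [(u ++ "-" ++ v, pvLabel sym u v)]) ++ [(v ++ "-" ++ u, pvLabel sym v u)]) acc
          = acc ++ t.flatMap (fun v => [(u ++ "-" ++ v, pvLabel sym u v), (v ++ "-" ++ u, pvLabel sym v u)]) := by
      intro t
      induction t with
      | nil => intro acc; simp
      | cons v tt iht => intro acc; rw [List.foldl_cons, iht]; simp [List.flatMap_cons]
    rw [hfold]
    simp [List.flatMap_cons, List.map_cons]
    rw [List.map_flatMap]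
    rfl

-- dict(ws) equals folding pvIns over the underlying pairs
theorem pvDictOfWrites (sp : List (String × String)) :
    ∀ (ps : List (String × String)) (m : PySem.Dict String String),
      (ps.map (fun ab => (ab.1 ++ "-" ++ ab.2,
          if (ab.1, ab.2) ∈ sp ∨ (ab.2, ab.1) ∈ sp then "seen" else "unseen"))).foldl
        (fun d kv => d.insert kv.1 kv.2) m
      = ps.foldl (pvIns sp) m := by
  intro ps
  induction ps with
  | nil => intro m; rfl
  | cons ab t ih => intro m; rw [List.map_cons, List.foldl_cons, List.foldl_cons, ih]; rfl

-- ===== VERDICT (by name: the statement is the Claim_ definition above) =====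
theorem create_seen_unseen_map_spec : Claim_equal_create_seen_unseen_map := by
  intro document seen_pairs _ _
  unfold Spec_create_seen_unseen_map create_seen_unseen_map create_seen_unseen_map_alt
  simp only []
  set entities := (PySem.Dict.mk document).getD "entities" [] with hent
  set ids := entities.map (fun e => (PySem.Dict.mk e).getD "entity_id" "") with hids
  set sym := PySem.Set.ofList (seen_pairs.map (fun p => pvNorm p.1 p.2)) with hsym
  congr 1
  · -- A's fold reads ids through pyGetD; apply the A bridge then the pair-sequence normal form
    have hlen : entities.length = ids.length := by simp [hids]
    have hgetid : ∀ i : Int, (PySem.Dict.mk (PySem.List.pyGetD entities i [])).getD "entity_id" ""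
        = PySem.List.pyGetD ids i "" := by
      intro i
      rw [hids]
      exact (PySem.List.pyGetD_map (f := fun e => (PySem.Dict.mk e).getD "entity_id" "") (xs := entities) (i := i) (d := [])).symm
    have hA :
        (PySem.List.pyRange 0 (entities.length : Int) 1).foldl (fun m u_entity_i =>
          let u_entity := PySem.List.pyGetD entities u_entity_i []
          let u_entity_id := (PySem.Dict.mk u_entity).getD "entity_id" ""
          (PySem.List.pyRange u_entity_i (entities.length : Int) 1).foldl (fun m v_entity_i =>
            let v_entity := PySem.List.pyGetD entities v_entity_i []
            let v_entity_id := (PySem.Dict.mk v_entity).getD "entity_id" ""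
            if (u_entity_id, v_entity_id) ∈ seen_pairs ∨ (v_entity_id, u_entity_id) ∈ seen_pairs then
              (m.insert (u_entity_id ++ "-" ++ v_entity_id) "seen").insert (v_entity_id ++ "-" ++ u_entity_id) "seen"
            else
              (m.insert (u_entity_id ++ "-" ++ v_entity_id) "unseen").insert (v_entity_id ++ "-" ++ u_entity_id) "unseen") m)
          PySem.Dict.empty
        = pvAGo seen_pairs PySem.Dict.empty ids := by
      have := pvA_bridge seen_pairs ids ids.length 0 (by omega) (by omega) PySem.Dict.empty
      simp only [Nat.cast_zero, List.drop_zero] at this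
      rw [← this, hlen]
      apply PySem.List.foldl_congr_mem
      intro acc ui _
      simp only [hgetid]
    rw [hA, pvAGo_eq_pairs]
    -- B: dict(pvWrites sym ids) as the same fold of pvIns over pvPairs ids
    have hB : PySem.Dict.ofList (pvWrites sym ids)
        = (pvPairs ids).foldl (pvIns seen_pairs) PySem.Dict.empty := by
      rw [pvWrites_eq_map, PySem.Dict.ofList, pvUpdate_foldl]
      have hlab : (pvPairs ids).map (fun ab => (ab.1 ++ "-" ++ ab.2, pvLabel sym ab.1 ab.2))
          = (pvPairs ids).map (fun ab => (ab.1 ++ "-" ++ ab.2,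
              if (ab.1, ab.2) ∈ seen_pairs ∨ (ab.2, ab.1) ∈ seen_pairs then "seen" else "unseen")) := by
        apply List.map_congr_left
        intro ab _
        rw [hsym, pvLabel_eq]
      rw [hlab, pvDictOfWrites]
    rw [hB]
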